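-- pv_equiv track=rewrite | github.com/h6kplus/SketchVerify | sketchverify/object_detector.py | _match_detection_to_target_object
-- ===== SOURCE A (Python) =====
-- def _match_detection_to_target_object(detection_label, target_objects):
--     """Match a detection label to the closest target object name."""
--     detection_label_lower = detection_label.lower().strip('.')
--
--     # Direct match
--     for target_obj in target_objects:
--         if target_obj.lower() == detection_label_lower:
--             return target_obj
--
--     # Check if detection label contains target object or vice versa
--     for target_obj in target_objects:
--         target_lower = target_obj.lower()
--         if (target_lower in detection_label_lower or
--             detection_label_lower in target_lower):
--             return target_obj
--
--     # If no match found, return the detection label itself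
--     return detection_label_lower
-- ===== SOURCE B (Python) =====
-- def _match_detection_to_target_object(detection_label, target_objects):
--     """Single pass: exact match returns immediately; first substring candidate kept."""
--     detection_label_lower = detection_label.lower().strip('.')
--     candidate = None
--     for target_obj in target_objects:
--         target_lower = target_obj.lower()
--         if target_lower == detection_label_lower:
--             return target_obj
--         if candidate is None and (target_lower in detection_label_lower or
--                                   detection_label_lower in target_lower):
--             candidate = target_obj
--     return candidate if candidate is not None else detection_label_lower
-- ===== Notes on version B (the rewrite author's own statement) =====
-- stated objective: alternative
-- what changed: Fuses A's two separate scans (exact-match pass, then substring pass) into one loop that returns immediately on an exact match and records only the first substring candidate.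
import Mathlib
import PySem

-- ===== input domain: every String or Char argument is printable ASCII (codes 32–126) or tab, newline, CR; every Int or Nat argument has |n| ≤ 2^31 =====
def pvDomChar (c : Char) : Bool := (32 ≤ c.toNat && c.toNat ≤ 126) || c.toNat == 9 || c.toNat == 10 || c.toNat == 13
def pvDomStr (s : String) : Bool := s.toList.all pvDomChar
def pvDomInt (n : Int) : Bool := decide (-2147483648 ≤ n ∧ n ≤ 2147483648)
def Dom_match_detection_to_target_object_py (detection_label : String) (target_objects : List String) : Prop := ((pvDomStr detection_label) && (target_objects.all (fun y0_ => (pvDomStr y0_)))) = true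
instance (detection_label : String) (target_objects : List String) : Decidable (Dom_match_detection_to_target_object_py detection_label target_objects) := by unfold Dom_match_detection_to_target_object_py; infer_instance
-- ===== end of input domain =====

-- B fuses A's two scans into one loop with a first-substring-candidate variable (one pass, each target lowered once).

-- ===== PORT A =====
-- first for-loop of A: first target whose lowercase equals dl
def pvALoop1 (dl : String) : List String → Option String
  | [] => none
  | t :: ts => if PySem.Str.lower t == dl then some t else pvALoop1 dl ts

-- second for-loop of A: first target with substring containment either way
def pvALoop2 (dl : String) : List String → Option String
  | [] => none
  | t :: ts =>
      let tl := PySem.Str.lower t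
      if PySem.Str.isIn tl dl || PySem.Str.isIn dl tl then some t else pvALoop2 dl ts

def match_detection_to_target_object_py (detection_label : String) (target_objects : List String) : String :=
  let dl := PySem.Str.stripChars (PySem.Str.lower detection_label) "."
  match pvALoop1 dl target_objects with
  | some t => t
  | none =>
    match pvALoop2 dl target_objects with
    | some t => t
    | none => dl

-- ===== PORT B =====
-- single loop: return on exact match, remember first substring candidate
def pvBLoop (dl : String) : List String → Option String → String
  | [], cand => match cand with | some c => c | none => dl
  | t :: ts, cand =>
      let tl := PySem.Str.lower t
      if tl == dl then t
      else
        pvBLoop dl ts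
          (if cand.isNone && (PySem.Str.isIn tl dl || PySem.Str.isIn dl tl) then some t else cand)

def match_detection_to_target_object_py_alt (detection_label : String) (target_objects : List String) : String :=
  let dl := PySem.Str.stripChars (PySem.Str.lower detection_label) "."
  pvBLoop dl target_objects none

-- ===== PRECONDITION & SPEC =====
def Spec_match_detection_to_target_object_py (detection_label : String) (target_objects : List String) (out : String) : Prop := out = match_detection_to_target_object_py_alt detection_label target_objects
instance (detection_label : String) (target_objects : List String) (out : String) : Decidable (Spec_match_detection_to_target_object_py detection_label target_objects out) := by unfold Spec_match_detection_to_target_object_py; infer_instance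

-- ===== CLAIM (what is proved, stated in full; the proofs are below) =====
def Claim_equal_match_detection_to_target_object_py : Prop := ∀ (detection_label : String) (target_objects : List String), Dom_match_detection_to_target_object_py detection_label target_objects → Spec_match_detection_to_target_object_py detection_label target_objects (match_detection_to_target_object_py detection_label target_objects)

-- ===== LEMMAS AND PROOFS =====
theorem pvBLoop_eq (dl : String) (ts : List String) (cand : Option String) :
    pvBLoop dl ts cand =
      match pvALoop1 dl ts with
      | some t => t
      | none =>
        match cand with
        | some c => c
        | none => match pvALoop2 dl ts with | some t => t | none => dl := by
  induction ts generalizing cand with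
  | nil => cases cand <;> simp [pvBLoop, pvALoop1, pvALoop2]
  | cons t ts ih =>
    simp only [pvBLoop, pvALoop1, pvALoop2]
    by_cases h1 : (PySem.Str.lower t == dl) = true
    · simp [h1]
    · simp only [h1, if_false, Bool.false_eq_true]
      rw [ih]
      cases cand with
      | some c => simp
      | none =>
        simp only [Option.isNone_none, Bool.true_and]
        split_ifs with h2
        · cases pvALoop1 dl ts <;> simp
        · simp
-- ===== VERDICT (by name: the statement is the Claim_ definition above) =====
theorem match_detection_to_target_object_py_spec : Claim_equal_match_detection_to_target_object_py := by
  intro dl ts _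
  unfold Spec_match_detection_to_target_object_py
  unfold match_detection_to_target_object_py match_detection_to_target_object_py_alt
  rw [pvBLoop_eq]
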